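-- pv_equiv track=rewrite | github.com/danielrmerskine/lager | box/lager/protocols/i2c/dispatcher.py | _format_scan_output
-- ===== SOURCE A (Python) =====
-- from typing import Any, Dict, List, Optional
--
-- def _format_scan_output(found_addrs: List[int],
--                          start_addr: int = 0x08,
--                          end_addr: int = 0x77) -> str:
--     """
--     Format scan results as an i2cdetect-style grid.
--
--     Output:
--          0  1  2  3  4  5  6  7  8  9  a  b  c  d  e  f
--     00:          -- -- -- -- -- -- -- -- -- -- -- -- -- --
--     10: -- -- -- -- -- -- -- -- -- -- -- -- -- -- -- --
--     20: -- -- -- -- -- -- -- -- -- -- -- -- -- -- -- --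
--     30: -- -- -- -- -- -- -- -- -- -- -- -- -- -- -- --
--     40: -- -- -- -- -- -- -- -- 48 -- -- -- -- -- -- --
--     50: -- -- -- -- -- -- -- -- -- -- -- -- -- -- -- --
--     60: -- -- -- -- -- -- -- -- -- -- -- -- -- -- -- --
--     70: -- -- -- -- -- -- -- --
--     """
--     found_set = set(found_addrs)
--     lines = []
--
--     # Header
--     lines.append("     " + "  ".join(f"{i:x}" for i in range(16)))
--
--     for row in range(0, 0x80, 16):
--         cols = []
--         for col in range(16):
--             addr = row + col
--             if addr < start_addr or addr > end_addr:
--                 cols.append("  ")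
--             elif addr in found_set:
--                 cols.append(f"{addr:02x}")
--             else:
--                 cols.append("--")
--         line = f"{row:02x}: " + " ".join(cols)
--         lines.append(line)
--
--     return "\n".join(lines)
-- ===== SOURCE B (Python) =====
-- def _format_scan_output(found_addrs, start_addr=0x08, end_addr=0x77):
--     # Template-plus-scatter: build all 128 cells in one pass, then overwrite
--     # the found addresses, then render the grid.
--     cells = ['  ' if a < start_addr or a > end_addr else '--' for a in range(128)]
--     for addr in found_addrs:
--         if start_addr <= addr <= end_addr and 0 <= addr < 128:
--             cells[addr] = f'{addr:02x}'
--     header = '     ' + '  '.join(f'{i:x}' for i in range(16))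
--     rows = [f'{base:02x}: ' + ' '.join(cells[base:base + 16])
--             for base in range(0, 0x80, 16)]
--     return '\n'.join([header] + rows)
-- ===== Notes on version B (the rewrite author's own statement) =====
-- stated objective: alternative
-- what changed: Replaces A's per-cell set-membership test inside nested row/column loops with a template-plus-scatter pass: a flat 128-cell template is built once, found addresses are scattered into it by index, and the grid is rendered by slicing.
import Mathlib
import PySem

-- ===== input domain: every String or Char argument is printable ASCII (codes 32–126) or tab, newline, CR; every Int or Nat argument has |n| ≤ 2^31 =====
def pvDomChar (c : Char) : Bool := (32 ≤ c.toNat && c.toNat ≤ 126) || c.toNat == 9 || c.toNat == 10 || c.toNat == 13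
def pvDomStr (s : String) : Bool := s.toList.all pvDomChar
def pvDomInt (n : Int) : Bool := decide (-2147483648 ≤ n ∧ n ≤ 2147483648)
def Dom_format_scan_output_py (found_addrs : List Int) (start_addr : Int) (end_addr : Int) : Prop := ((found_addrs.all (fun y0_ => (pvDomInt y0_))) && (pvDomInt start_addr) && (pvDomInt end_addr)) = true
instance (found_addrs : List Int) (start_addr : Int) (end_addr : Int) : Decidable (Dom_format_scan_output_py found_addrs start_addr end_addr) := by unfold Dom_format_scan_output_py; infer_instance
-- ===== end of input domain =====

-- B replaces A's per-cell membership test inside nested row/column loops by a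
-- template-plus-scatter pass over a flat 128-cell list rendered by slicing (objective: alternative; same asymptotic cost).

-- f"{i:x}" / f"{n:02x}" — exact for the arguments both programs format: 0 ≤ i < 16 resp. 0 ≤ n < 256
def pvHexDigit (n : Nat) : Char := if n < 10 then Char.ofNat (48 + n) else Char.ofNat (87 + n)
def pvHex1 (i : Int) : String := String.ofList [pvHexDigit i.toNat]
def pvHex2 (n : Int) : String := String.ofList [pvHexDigit (n.toNat / 16), pvHexDigit (n.toNat % 16)]

-- ===== PORT A =====
def format_scan_output_py (found_addrs : List Int) (start_addr : Int) (end_addr : Int) : String :=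
  let found_set : PySem.Set Int := PySem.Set.ofList found_addrs
  let lines : List String := []
  let lines := lines ++ ["     " ++ PySem.Str.join "  " ((PySem.List.pyRange 0 16 1).map (fun i => pvHex1 i))]
  let lines := (PySem.List.pyRange 0 128 16).foldl (fun lines row =>
      lines ++ [pvHex2 row ++ ": " ++ PySem.Str.join " "
        ((PySem.List.pyRange 0 16 1).foldl (fun cols col =>
            if row + col < start_addr ∨ row + col > end_addr then cols ++ ["  "]
            else if (found_set).contains (row + col) then cols ++ [pvHex2 (row + col)]
            else cols ++ ["--"]) ([] : List String))]) lines
  PySem.Str.join "\n" lines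

-- ===== PORT B =====
def format_scan_output_py_alt (found_addrs : List Int) (start_addr : Int) (end_addr : Int) : String :=
  let cells : List String := (PySem.List.pyRange 0 128 1).map
      (fun a => if a < start_addr ∨ a > end_addr then "  " else "--")
  let cells := found_addrs.foldl (fun cells addr =>
      if start_addr ≤ addr ∧ addr ≤ end_addr ∧ 0 ≤ addr ∧ addr < 128 then
        PySem.List.pySetD cells addr (pvHex2 addr)
      else cells) cells
  let header := "     " ++ PySem.Str.join "  " ((PySem.List.pyRange 0 16 1).map (fun i => pvHex1 i))
  let rows := (PySem.List.pyRange 0 128 16).map (fun base =>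
      pvHex2 base ++ ": " ++ PySem.Str.join " " (PySem.List.slice cells (some base) (some (base + 16))))
  PySem.Str.join "\n" (header :: rows)

-- ===== PRECONDITION & SPEC =====
def Spec_format_scan_output_py (found_addrs : List Int) (start_addr : Int) (end_addr : Int) (out : String) : Prop := out = format_scan_output_py_alt found_addrs start_addr end_addr
instance (found_addrs : List Int) (start_addr : Int) (end_addr : Int) (out : String) : Decidable (Spec_format_scan_output_py found_addrs start_addr end_addr out) := by unfold Spec_format_scan_output_py; infer_instance

-- ===== CLAIM (what is proved, stated in full; the proofs are below) =====
def Claim_equal_format_scan_output_py : Prop := ∀ (found_addrs : List Int) (start_addr : Int) (end_addr : Int), Dom_format_scan_output_py found_addrs start_addr end_addr → Spec_format_scan_output_py found_addrs start_addr end_addr (format_scan_output_py found_addrs start_addr end_addr)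

-- ===== LEMMAS AND PROOFS =====

-- the value both programs place at grid cell `addr`
def pvCell (found_addrs : List Int) (s e addr : Int) : String :=
  if addr < s ∨ addr > e then "  "
  else if (PySem.Set.ofList found_addrs).contains addr then pvHex2 addr
  else "--"

lemma pvScatter_len (s e : Int) (L : List Int) (c : List String) :
    (L.foldl (fun cells addr =>
        if s ≤ addr ∧ addr ≤ e ∧ 0 ≤ addr ∧ addr < 128 then
          PySem.List.pySetD cells addr (pvHex2 addr)
        else cells) c).length = c.length := by
  induction L generalizing c with
  | nil => rfl
  | cons a t ih =>
      simp only [List.foldl_cons]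
      rw [ih]
      split
      · simp [PySem.List.length_pySetD]
      · rfl

lemma pvScatter_get (s e : Int) (L : List Int) (c : List String) (hc : c.length = 128)
    (i : Nat) (hi : i < 128) :
    ((L.foldl (fun cells addr =>
        if s ≤ addr ∧ addr ≤ e ∧ 0 ≤ addr ∧ addr < 128 then
          PySem.List.pySetD cells addr (pvHex2 addr)
        else cells) c))[i]? =
      if (i : Int) ∈ L ∧ s ≤ (i : Int) ∧ (i : Int) ≤ e then some (pvHex2 i) else (c)[i]? := by
  induction L generalizing c with
  | nil => simp
  | cons a t ih =>
      simp only [List.foldl_cons]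
      have hlen : (if s ≤ a ∧ a ≤ e ∧ 0 ≤ a ∧ a < 128 then
          PySem.List.pySetD c a (pvHex2 a) else c).length = 128 := by
        split
        · simp [PySem.List.length_pySetD, hc]
        · exact hc
      rw [ih _ hlen]
      by_cases hm : (i : Int) ∈ t ∧ s ≤ (i : Int) ∧ (i : Int) ≤ e
      · rw [if_pos hm, if_pos ⟨List.mem_cons.mpr (Or.inr hm.1), hm.2⟩]
      · rw [if_neg hm]
        by_cases ha : a = (i : Int) ∧ s ≤ (i : Int) ∧ (i : Int) ≤ e
        · obtain ⟨hai, hse⟩ := ha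
          subst hai
          rw [if_pos ⟨hse.1, hse.2, by omega, by exact_mod_cast hi⟩]
          rw [PySem.List.pySetD_of_nonneg _ _ (by omega : (0:Int) ≤ (i : Int))]
          rw [if_pos ⟨List.mem_cons_self, hse⟩]
          rw [show ((i : Int)).toNat = i from by omega]
          rw [List.getElem?_set_self (by omega)]
        · have hstep : ((if s ≤ a ∧ a ≤ e ∧ 0 ≤ a ∧ a < 128 then
              PySem.List.pySetD c a (pvHex2 a) else c))[i]? = (c)[i]? := by
            split
            · rename_i h
              rw [PySem.List.pySetD_of_nonneg _ _ h.2.2.1]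
              refine List.getElem?_set_ne ?_
              omega
            · rfl
          rw [hstep, if_neg]
          rintro ⟨hmem, hse⟩
          rcases List.mem_cons.mp hmem with h | h
          · exact ha ⟨h.symm, hse⟩
          · exact hm ⟨h, hse⟩

lemma pvCellsEq (found_addrs : List Int) (s e : Int) :
    found_addrs.foldl (fun cells addr =>
        if s ≤ addr ∧ addr ≤ e ∧ 0 ≤ addr ∧ addr < 128 then
          PySem.List.pySetD cells addr (pvHex2 addr)
        else cells)
      ((PySem.List.pyRange 0 128 1).map (fun a => if a < s ∨ a > e then "  " else "--"))
    = (PySem.List.pyRange 0 128 1).map (fun a => pvCell found_addrs s e a) := by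
  have hc : ((PySem.List.pyRange 0 128 1).map
      (fun a => if a < s ∨ a > e then "  " else "--")).length = 128 := by
    simp [PySem.List.length_pyRange_one]
  apply List.ext_getElem?
  intro i
  by_cases hi : i < 128
  · rw [pvScatter_get s e _ _ hc i hi]
    rw [show (128:Int) = ((128:Nat):Int) from by norm_num]
    rw [PySem.List.getElem?_map_pyRange_zero _ _ _ hi,
        PySem.List.getElem?_map_pyRange_zero _ _ _ hi]
    unfold pvCell
    by_cases hb : (i : Int) < s ∨ (i : Int) > e
    · rw [if_neg (by rintro ⟨_, h2, h3⟩; omega), if_pos hb, if_pos hb]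
    · rw [if_neg hb, if_neg hb]
      by_cases hm : (i : Int) ∈ found_addrs
      · rw [if_pos ⟨hm, by omega, by omega⟩,
            if_pos (by rw [PySem.Set.contains_iff, PySem.Set.mem_ofList]; exact hm)]
      · rw [if_neg (by rintro ⟨h1, _⟩; exact hm h1),
            if_neg (by rw [PySem.Set.contains_iff, PySem.Set.mem_ofList]; exact hm)]
  · have h1 : ((found_addrs.foldl (fun cells addr =>
        if s ≤ addr ∧ addr ≤ e ∧ 0 ≤ addr ∧ addr < 128 then
          PySem.List.pySetD cells addr (pvHex2 addr)
        else cells)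
      ((PySem.List.pyRange 0 128 1).map (fun a => if a < s ∨ a > e then "  " else "--"))))[i]? = none :=
      List.getElem?_eq_none (by rw [pvScatter_len, hc]; omega)
    have h2 : ((PySem.List.pyRange 0 128 1).map (fun a => pvCell found_addrs s e a))[i]? = none :=
      List.getElem?_eq_none (by simp [PySem.List.length_pyRange_one]; omega)
    rw [h1, h2]

-- A's inner column loop produces exactly the per-cell values
lemma pvInner (found_addrs : List Int) (s e row : Int) :
    (PySem.List.pyRange 0 16 1).foldl (fun cols col =>
        if row + col < s ∨ row + col > e then cols ++ ["  "]
        else if (PySem.Set.ofList found_addrs).contains (row + col) then cols ++ [pvHex2 (row + col)]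
        else cols ++ ["--"]) ([] : List String)
    = (PySem.List.pyRange 0 16 1).map (fun col => pvCell found_addrs s e (row + col)) := by
  have hf : (fun (cols : List String) (col : Int) =>
        if row + col < s ∨ row + col > e then cols ++ ["  "]
        else if (PySem.Set.ofList found_addrs).contains (row + col) then cols ++ [pvHex2 (row + col)]
        else cols ++ ["--"])
      = fun cols col => cols ++ [pvCell found_addrs s e (row + col)] := by
    funext cols col
    unfold pvCell
    split_ifs <;> rfl
  rw [hf, PySem.List.foldl_append_singleton_eq_map]
  simp

-- ===== VERDICT (by name: the statement is the Claim_ definition above) =====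
set_option maxRecDepth 40000 in
theorem format_scan_output_py_spec : Claim_equal_format_scan_output_py := by
  intro found_addrs s e _
  unfold Spec_format_scan_output_py
  simp only [format_scan_output_py, format_scan_output_py_alt, List.nil_append]
  rw [PySem.List.foldl_append_singleton_eq_map, pvCellsEq]
  simp only [pvInner]
  rw [List.singleton_append]
  refine congrArg _ (congrArg _ (List.map_congr_left ?_))
  intro base hbase
  have hlist : PySem.List.pyRange 0 128 16 = [0, 16, 32, 48, 64, 80, 96, 112] := by rfl
  rw [hlist] at hbase
  fin_cases hbase <;> rfl
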